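-- pv_equiv track=rewrite | github.com/AlexMIaoPU/2025-recruitment-technical-assessment | backend/py_template/devdonalds.py | parse_handwriting
-- ===== SOURCE A (Python) =====
-- from typing import List, Dict, Union
--
-- def parse_handwriting(recipeName: str) -> Union[str | None]:
-- 	# Replace - and _ with white space
-- 	recipeName = recipeName.replace('_', ' ')
-- 	recipeName = recipeName.replace('-', ' ')
--
-- 	# remove non character or non whitespace
-- 	recipeName = ''.join([c for c in recipeName if (c.isalpha() or c == ' ')])
--
--
-- 	# Remove more than one white space
-- 	tokens = recipeName.split()
-- 	recipeName = ' '.join(tokens)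
--
-- 	# Capitalise first char
-- 	recipeName = recipeName.title()
--
-- 	if not len(recipeName) > 0:
-- 		return None
--
-- 	return recipeName
-- ===== SOURCE B (Python) =====
-- def parse_handwriting(recipeName):
--     # single pass: '_' '-' ' ' flush the current word; letters extend it
--     # (first letter uppercased, rest lowercased); anything else is ignored
--     words = []
--     buf = ""
--     for c in recipeName:
--         if c in ' _-':
--             if buf:
--                 words.append(buf[0].upper() + buf[1:].lower())
--                 buf = ""
--         elif c.isalpha():
--             buf += c
--     if buf:
--         words.append(buf[0].upper() + buf[1:].lower())
--     return ' '.join(words) if words else None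
-- ===== Notes on version B (the rewrite author's own statement) =====
-- stated objective: alternative
-- what changed: Replaced A's five-pass pipeline (two replaces, a filter, split/join, then title-casing) by a single left-to-right pass maintaining a word buffer that is flushed at separator characters (space, underscore, hyphen), extended by letters (cased at flush time) and left untouched by other characters.
import Mathlib
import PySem

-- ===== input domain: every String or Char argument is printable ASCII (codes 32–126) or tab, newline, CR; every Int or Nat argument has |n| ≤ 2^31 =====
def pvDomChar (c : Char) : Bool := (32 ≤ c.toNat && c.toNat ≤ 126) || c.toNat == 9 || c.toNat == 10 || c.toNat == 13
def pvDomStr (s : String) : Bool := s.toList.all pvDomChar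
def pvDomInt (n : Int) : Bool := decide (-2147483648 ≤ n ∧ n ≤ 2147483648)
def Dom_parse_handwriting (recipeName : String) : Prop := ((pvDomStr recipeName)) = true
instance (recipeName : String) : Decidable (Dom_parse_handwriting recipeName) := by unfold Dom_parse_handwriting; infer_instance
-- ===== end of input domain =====

-- B replaces A's five-pass pipeline (replace/replace/filter/split+join/title) by one
-- left-to-right pass with a word buffer; same return value, no speed claim.


-- ===== PORT A =====
-- hand port of Python str.title (exact on ASCII: a letter is uppercased after a
-- non-letter, lowercased after a letter; other characters are kept and reset the flag)
def titleGo : Bool → List Char → List Char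
  | _, [] => []
  | prev, c :: cs =>
    (if PySem.Chars.isalpha c then
        (if prev then PySem.Chars.lowerChar c else PySem.Chars.upperChar c)
      else c) :: titleGo (PySem.Chars.isalpha c) cs

def parse_handwriting (recipeName : String) : Option String :=
  let s1 := PySem.Chars.replace recipeName.toList ['_'] [' ']   -- recipeName.replace('_',' ')
  let s2 := PySem.Chars.replace s1 ['-'] [' ']                   -- .replace('-',' ')
  let s3 := s2.filter (fun c => PySem.Chars.isalpha c || c == ' ')  -- ''.join([c for c in … if …])
  let tokens := PySem.Chars.split₀ s3                            -- .split()
  let joined := PySem.Chars.join [' '] tokens                    -- ' '.join(tokens)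
  let titled := titleGo false joined                             -- .title()
  if !(titled.length > 0) then none else some (String.ofList titled)

-- ===== PORT B =====
-- buf[0].upper() + buf[1:].lower()
def caseWord (w : List Char) : List Char :=
  match w with
  | [] => []
  | a :: t => PySem.Chars.upperChar a :: PySem.Chars.lower t

def stepB (st : List (List Char) × List Char) (c : Char) : List (List Char) × List Char :=
  if c == ' ' || c == '_' || c == '-' then
    (if st.2.isEmpty then st else (st.1 ++ [caseWord st.2], []))
  else if PySem.Chars.isalpha c then (st.1, st.2 ++ [c])
  else st

def parse_handwriting_alt (recipeName : String) : Option String :=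
  let st := recipeName.toList.foldl stepB ([], [])
  let ws := if st.2.isEmpty then st.1 else st.1 ++ [caseWord st.2]
  if ws.isEmpty then none else some (String.ofList (PySem.Chars.join [' '] ws))

-- ===== PRECONDITION & SPEC =====
def Spec_parse_handwriting (recipeName : String) (out : Option String) : Prop := out = parse_handwriting_alt recipeName
instance (recipeName : String) (out : Option String) : Decidable (Spec_parse_handwriting recipeName out) := by unfold Spec_parse_handwriting; infer_instance

-- ===== CLAIM (what is proved, stated in full; the proofs are below) =====
def Claim_equal_parse_handwriting : Prop := ∀ (recipeName : String), Dom_parse_handwriting recipeName → Spec_parse_handwriting recipeName (parse_handwriting recipeName)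

-- ===== LEMMAS AND PROOFS =====

-- the two replaces compose to this single substitution
def subCh (c : Char) : Char := if c == '_' || c == '-' then ' ' else c
-- the filter predicate
def keepCh (c : Char) : Bool := PySem.Chars.isalpha c || c == ' '

lemma replace_single_go (a b : Char) : ∀ (n : Nat) (l acc : List Char), l.length ≤ n →
    PySem.Chars.replace.go [a] [b] n l acc
      = acc.reverse ++ l.map (fun c => if c == a then b else c) := by
  intro n
  induction n with
  | zero =>
    intro l acc h
    have : l = [] := List.eq_nil_of_length_eq_zero (Nat.le_zero.mp h)
    subst this; simp [PySem.Chars.replace.go]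
  | succ n ih =>
    intro l acc h
    cases l with
    | nil => simp [PySem.Chars.replace.go]
    | cons c t =>
      by_cases hc : c = a
      · subst hc
        have hpre : List.isPrefixOf [c] (c :: t) = true := by
          simp [List.isPrefixOf]
        simp only [PySem.Chars.replace.go, hpre, if_true, List.length_cons,
          List.length_nil, Nat.zero_add, List.drop_one, List.tail_cons, List.reverse_cons,
          List.reverse_nil, List.nil_append, List.singleton_append]
        rw [ih t (b :: acc) (by simpa using Nat.le_of_succ_le_succ h)]
        simp
      · have hpre : List.isPrefixOf [a] (c :: t) = false := by
          simp [List.isPrefixOf, beq_iff_eq]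
          intro h'; exact absurd h'.symm hc
        simp only [PySem.Chars.replace.go, hpre]
        rw [ih t (c :: acc) (by simpa using Nat.le_of_succ_le_succ h)]
        simp [hc]

lemma replace_single (a b : Char) (cs : List Char) :
    PySem.Chars.replace cs [a] [b] = cs.map (fun c => if c == a then b else c) := by
  simp only [PySem.Chars.replace, List.isEmpty_cons, Bool.false_eq_true, if_false]
  simpa using replace_single_go a b cs.length cs [] le_rfl

lemma not_isspace_of_isalpha (c : Char) (h : PySem.Chars.isalpha c = true) :
    PySem.Chars.isspace c = false := by
  simp [PySem.Chars.isalpha, PySem.Chars.isupper, PySem.Chars.islower, Char.le_def,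
    UInt32.le_iff_toNat_le] at h
  simp [PySem.Chars.isspace]
  omega

lemma split0_go_acc : ∀ (es cur : List Char) (acc : List (List Char)),
    PySem.Chars.split₀.go es cur acc = acc.reverse ++ PySem.Chars.split₀.go es cur [] := by
  intro es
  induction es with
  | nil => intro cur acc; by_cases h : cur.isEmpty <;> simp [PySem.Chars.split₀.go, h]
  | cons c t ih =>
    intro cur acc
    by_cases hs : PySem.Chars.isspace c
    · by_cases hc : cur.isEmpty
      · simp only [PySem.Chars.split₀.go, hs, hc, if_true]
        exact ih [] acc
      · simp only [PySem.Chars.split₀.go, hs, hc, Bool.false_eq_true, if_false, if_true]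
        rw [ih [] (cur.reverse :: acc), ih [] [cur.reverse]]
        simp
    · simp only [PySem.Chars.split₀.go, hs, Bool.false_eq_true, if_false]
      exact ih (c :: cur) acc

-- B's fold, started from any state, produces the case-mapped words of split₀ of the cleaned list
lemma main_fold : ∀ (cs : List Char) (ws : List (List Char)) (buf : List Char),
    (if (List.foldl stepB (ws, buf) cs).2.isEmpty then (List.foldl stepB (ws, buf) cs).1
     else (List.foldl stepB (ws, buf) cs).1 ++ [caseWord (List.foldl stepB (ws, buf) cs).2])
    = ws ++ (PySem.Chars.split₀.go ((cs.map subCh).filter keepCh) buf.reverse []).map caseWord := by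
  intro cs
  induction cs with
  | nil =>
    intro ws buf
    cases buf with
    | nil => simp [PySem.Chars.split₀.go]
    | cons a t => simp [PySem.Chars.split₀.go]
  | cons c rest ih =>
    intro ws buf
    by_cases hsep : c = ' ' ∨ c = '_' ∨ c = '-'
    · have hsub : subCh c = ' ' := by
        rcases hsep with h | h | h <;> subst h <;> rfl
      have hstep : stepB (ws, buf) c
          = (if buf.isEmpty then (ws, buf) else (ws ++ [caseWord buf], [])) := by
        have : (c == ' ' || c == '_' || c == '-') = true := by
          rcases hsep with h | h | h <;> subst h <;> rfl
        simp [stepB, this]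
      cases buf with
      | nil =>
        simp only [List.foldl_cons, hstep, List.isEmpty_nil, if_true]
        rw [ih ws []]
        simp [hsub, keepCh, PySem.Chars.split₀.go, PySem.Chars.isspace]
      | cons b bt =>
        simp only [List.foldl_cons, hstep, List.isEmpty_cons, Bool.false_eq_true, if_false]
        rw [ih (ws ++ [caseWord (b :: bt)]) []]
        have hsp : PySem.Chars.isspace ' ' = true := by decide
        simp only [List.map_cons, hsub, List.filter_cons,
          show keepCh ' ' = true from by decide, if_true,
          PySem.Chars.split₀.go, hsp, List.isEmpty_cons, List.reverse_cons]
        rw [if_neg (by simp)]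
        rw [split0_go_acc (List.filter keepCh (List.map subCh rest)) []
          [(bt.reverse ++ [b]).reverse]]
        simp
    · have hne : (c == ' ' || c == '_' || c == '-') = false := by
        simp only [Bool.or_eq_false_iff, beq_eq_false_iff_ne, ne_eq]
        exact ⟨⟨fun h => hsep (Or.inl h), fun h => hsep (Or.inr (Or.inl h))⟩,
          fun h => hsep (Or.inr (Or.inr h))⟩
      have hsub : subCh c = c := by
        simp only [Bool.or_eq_false_iff] at hne
        simp [subCh, hne.1.2, hne.2]
      by_cases ha : PySem.Chars.isalpha c
      · have hstep : stepB (ws, buf) c = (ws, buf ++ [c]) := by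
          simp [stepB, hne, ha]
        simp only [List.foldl_cons, hstep]
        rw [ih ws (buf ++ [c])]
        have hkeep : keepCh c = true := by simp [keepCh, ha]
        simp only [List.map_cons, hsub, List.filter_cons, hkeep, if_true,
          PySem.Chars.split₀.go, not_isspace_of_isalpha c ha, Bool.false_eq_true, if_false,
          List.reverse_append, List.reverse_cons, List.reverse_nil, List.nil_append,
          List.singleton_append]
      · have hstep : stepB (ws, buf) c = (ws, buf) := by
          simp [stepB, hne, ha]
        simp only [List.foldl_cons, hstep]
        rw [ih ws buf]
        have hkeep : keepCh c = false := by
          simp only [Bool.or_eq_false_iff] at hne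
          simp [keepCh, ha, hne.1.1]
        simp [hsub, hkeep]

-- every word produced by split₀ of an alpha-or-space list is nonempty and all-alpha
lemma split0_go_words : ∀ (es cur : List Char) (acc : List (List Char)),
    es.all keepCh = true → cur.all PySem.Chars.isalpha = true →
    (∀ w ∈ acc, w ≠ [] ∧ w.all PySem.Chars.isalpha = true) →
    ∀ w ∈ PySem.Chars.split₀.go es cur acc, w ≠ [] ∧ w.all PySem.Chars.isalpha = true := by
  intro es
  induction es with
  | nil =>
    intro cur acc _ hcur hacc w hw
    by_cases hc : cur.isEmpty
    · simp [PySem.Chars.split₀.go, hc] at hw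
      exact hacc w (by simpa using hw)
    · simp [PySem.Chars.split₀.go, hc] at hw
      rcases (by simpa using hw) with hw | hw
      · exact hacc w hw
      · subst hw
        refine ⟨by simpa [List.isEmpty_iff] using hc, by simpa using hcur⟩
  | cons c t ih =>
    intro cur acc hall hcur hacc w hw
    rw [List.all_cons, Bool.and_eq_true] at hall
    obtain ⟨hc, ht⟩ := hall
    by_cases hs : PySem.Chars.isspace c
    · by_cases hce : cur.isEmpty
      · simp only [PySem.Chars.split₀.go, hs, hce, if_true] at hw
        exact ih [] acc ht (by simp) hacc w hw
      · simp only [PySem.Chars.split₀.go, hs, hce, Bool.false_eq_true, if_false, if_true] at hw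
        refine ih [] (cur.reverse :: acc) ht (by simp) ?_ w hw
        intro v hv
        rcases List.mem_cons.mp hv with hv | hv
        · subst hv
          exact ⟨by simpa [List.isEmpty_iff] using hce, by simpa using hcur⟩
        · exact hacc v (by simpa using hv)
    · have hca : PySem.Chars.isalpha c = true := by
        rcases (by simpa [keepCh] using hc : PySem.Chars.isalpha c = true ∨ c = ' ') with h | h
        · exact h
        · subst h; exact absurd (by decide : PySem.Chars.isspace ' ' = true) (by simpa using hs)
      simp only [PySem.Chars.split₀.go, hs, Bool.false_eq_true, if_false] at hw
      exact ih (c :: cur) acc ht (by simp [hca, hcur]) hacc w hw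

lemma titleGo_true_alpha (t : List Char) (ht : t.all PySem.Chars.isalpha = true)
    (rest : List Char) :
    titleGo true (t ++ rest) = PySem.Chars.lower t ++ titleGo true rest := by
  induction t with
  | nil => simp [PySem.Chars.lower]
  | cons a s ih =>
    simp only [List.all_cons, Bool.and_eq_true] at ht
    simp [titleGo, ht.1, PySem.Chars.lower, ih ht.2]

lemma titleGo_word (w : List Char) (hw : w ≠ []) (ha : w.all PySem.Chars.isalpha = true)
    (rest : List Char) :
    titleGo false (w ++ rest) = caseWord w ++ titleGo true rest := by
  cases w with
  | nil => exact absurd rfl hw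
  | cons a t =>
    simp only [List.all_cons, Bool.and_eq_true] at ha
    simp [titleGo, ha.1, caseWord, titleGo_true_alpha t ha.2 rest]

lemma title_join : ∀ (ws : List (List Char)),
    (∀ w ∈ ws, w ≠ [] ∧ w.all PySem.Chars.isalpha = true) →
    titleGo false (PySem.Chars.join [' '] ws) = PySem.Chars.join [' '] (ws.map caseWord) := by
  intro ws
  induction ws with
  | nil => intro _; simp [PySem.Chars.join, List.intercalate, titleGo]
  | cons w t ih =>
    intro h
    have hw := h w (by simp)
    cases t with
    | nil =>
      simp only [PySem.Chars.join, List.map_cons, List.map_nil, List.intercalate]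
      simpa [titleGo] using titleGo_word w hw.1 hw.2 []
    | cons v s =>
      have hjoin : PySem.Chars.join [' '] (w :: v :: s)
          = w ++ ' ' :: PySem.Chars.join [' '] (v :: s) := by
        simp [PySem.Chars.join, List.intercalate]
      have hjoin2 : PySem.Chars.join [' '] ((w :: v :: s).map caseWord)
          = caseWord w ++ ' ' :: PySem.Chars.join [' '] ((v :: s).map caseWord) := by
        simp [PySem.Chars.join, List.intercalate]
      rw [hjoin, hjoin2, titleGo_word w hw.1 hw.2]
      have : titleGo true (' ' :: PySem.Chars.join [' '] (v :: s))
          = ' ' :: titleGo false (PySem.Chars.join [' '] (v :: s)) := by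
        simp [titleGo, show PySem.Chars.isalpha ' ' = false from by decide]
      rw [this, ih (fun u hu => h u (by simp [hu]))]

lemma caseWord_ne_nil (w : List Char) (hw : w ≠ []) : caseWord w ≠ [] := by
  cases w with
  | nil => exact absurd rfl hw
  | cons a t => simp [caseWord]

-- ===== VERDICT (by name: the statement is the Claim_ definition above) =====
theorem parse_handwriting_spec : Claim_equal_parse_handwriting := by
  intro s _
  unfold Spec_parse_handwriting parse_handwriting parse_handwriting_alt
  simp only [replace_single]
  have hmap : ((s.toList.map fun c => if c == '_' then ' ' else c).map
      (fun c => if c == '-' then ' ' else c)) = s.toList.map subCh := by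
    rw [List.map_map]; apply List.map_congr_left; intro c _
    by_cases h1 : c = '_' <;> by_cases h2 : c = '-' <;> simp [subCh, h1, h2]
  rw [hmap]
  have hfilter : List.filter (fun c => PySem.Chars.isalpha c || c == ' ')
      (s.toList.map subCh) = List.filter keepCh (s.toList.map subCh) := rfl
  rw [hfilter]
  have hwords : ∀ w ∈ PySem.Chars.split₀ (List.filter keepCh (s.toList.map subCh)),
      w ≠ [] ∧ w.all PySem.Chars.isalpha = true := by
    intro w hw
    refine split0_go_words _ [] [] ?_ (by simp) (by simp) w hw
    simp only [List.all_filter]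
    exact List.all_eq_true.mpr (fun _ _ => by simp)
  have hB := main_fold s.toList [] []
  simp only [List.nil_append, List.reverse_nil] at hB
  rw [hB]
  have hgo : PySem.Chars.split₀.go (List.filter keepCh (s.toList.map subCh)) [] []
      = PySem.Chars.split₀ (List.filter keepCh (s.toList.map subCh)) := rfl
  rw [hgo, title_join _ hwords]
  cases hWc : PySem.Chars.split₀ (List.filter keepCh (s.toList.map subCh)) with
  | nil => simp [PySem.Chars.join, List.intercalate]
  | cons w t =>
    have hwne : caseWord w ≠ [] :=
      caseWord_ne_nil w (hwords w (by rw [hWc]; simp)).1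
    have hlen : 0 < (PySem.Chars.join [' '] ((w :: t).map caseWord)).length := by
      cases t with
      | nil =>
        simp only [List.map_cons, List.map_nil, PySem.Chars.join, List.intercalate]
        simpa [List.length_pos_iff] using hwne
      | cons v s' =>
        have : PySem.Chars.join [' '] ((w :: v :: s').map caseWord)
            = caseWord w ++ ' ' :: PySem.Chars.join [' '] ((v :: s').map caseWord) := by
          simp [PySem.Chars.join, List.intercalate]
        rw [this]; simp
    have hne : PySem.Chars.join [' '] ((w :: t).map caseWord) ≠ [] := by
      intro h; rw [h] at hlen; simp at hlen
    simp only [List.map_cons] at hne ⊢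
    simp [hne]
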